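-- pv_equiv track=rewrite | github.com/hamidbeiki/Cattle-Genome | python scripts/combine-gtf_files.py | get_final_list
-- ===== SOURCE A (Python) =====
-- def get_final_list(nestedlist,ordered_trs):
--     final_list=[]
--     p=[]
--     for i in ordered_trs:
--         out=[]
--         for j in nestedlist:
--             if i in j:
--                 if j in p:
--                     pass
--                 else:
--                     out.append(j)
--                     p.append(j)
--         if len(out)>0:
--             final_list.append(out)
--     return(final_list)
-- ===== SOURCE B (Python) =====
-- def get_final_list(nestedlist, ordered_trs):
--     # inverted index: element -> sublists containing it (first-occurrence order)
--     index = {}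
--     for j in nestedlist:
--         for e in dict.fromkeys(j):
--             index.setdefault(e, []).append(j)
--     seen = set()   # sublists already emitted (as tuples)
--     done = set()   # keys already processed: a repeated key can never emit anything new
--     final_list = []
--     for i in ordered_trs:
--         if i in done:
--             continue
--         done.add(i)
--         out = []
--         for j in index.get(i, []):
--             t = tuple(j)
--             if t not in seen:
--                 seen.add(t)
--                 out.append(j)
--         if out:
--             final_list.append(out)
--     return final_list
-- ===== Notes on version B (the rewrite author's own statement) =====
-- stated objective: faster
-- what changed: B builds a one-pass inverted index element->sublists, answers each key by a dict lookup with a hash-set dedup of emitted sublists, and skips already-processed keys (a repeated key can never emit anything new), instead of A's rescan of all of nestedlist plus linear 'j in p' scan per key.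
import Mathlib
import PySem

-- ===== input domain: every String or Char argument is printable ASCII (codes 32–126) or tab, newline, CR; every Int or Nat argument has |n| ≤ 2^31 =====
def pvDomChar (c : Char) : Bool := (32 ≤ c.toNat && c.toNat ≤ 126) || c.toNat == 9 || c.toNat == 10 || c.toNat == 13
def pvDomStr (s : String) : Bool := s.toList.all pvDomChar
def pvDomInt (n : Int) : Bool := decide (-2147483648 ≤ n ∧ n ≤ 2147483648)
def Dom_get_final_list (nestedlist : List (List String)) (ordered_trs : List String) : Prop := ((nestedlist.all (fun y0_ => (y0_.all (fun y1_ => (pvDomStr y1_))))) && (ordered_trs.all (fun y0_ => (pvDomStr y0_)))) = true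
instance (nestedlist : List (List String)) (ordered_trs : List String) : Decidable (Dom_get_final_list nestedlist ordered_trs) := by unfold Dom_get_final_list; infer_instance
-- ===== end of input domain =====

-- B replaces A's rescan of the whole nestedlist for every key by a one-pass inverted index
-- element → sublists plus a seen-set for the dedup (objective: faster, asymptotic).

-- ===== PORT A =====
def get_final_list (nestedlist : List (List String)) (ordered_trs : List String) : List (List (List String)) :=
  -- state: (final_list, p); inner state: (out, p)
  (ordered_trs.foldl (fun (st : List (List (List String)) × List (List String)) i =>
    let inner := nestedlist.foldl
      (fun (st2 : List (List String) × List (List String)) j =>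
        if i ∈ j then
          (if j ∈ st2.2 then st2 else (st2.1 ++ [j], st2.2 ++ [j]))
        else st2) ([], st.2)
    (if inner.1.length > 0 then st.1 ++ [inner.1] else st.1, inner.2)) ([], [])).1

-- ===== PORT B =====
-- index.setdefault(e, []).append(j) over e in dict.fromkeys(j)  =  modify e [] (· ++ [j]) over PySem.List.dedup j
def pvIndex (nestedlist : List (List String)) : PySem.Dict String (List (List String)) :=
  nestedlist.foldl (fun d j =>
    (PySem.List.dedup j).foldl (fun d e => d.modify e [] (· ++ [j])) d) PySem.Dict.empty

def get_final_list_alt (nestedlist : List (List String)) (ordered_trs : List String) : List (List (List String)) :=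
  let index := pvIndex nestedlist
  -- state: (final_list, seen, done)
  (ordered_trs.foldl (fun (st : List (List (List String)) × PySem.Set (List String) × PySem.Set String) i =>
    if i ∈ st.2.2 then st
    else
      let done := PySem.Set.add st.2.2 i
      let inner := (index.getD i []).foldl
        (fun (st2 : List (List String) × PySem.Set (List String)) j =>
          if j ∈ st2.2 then st2 else (st2.1 ++ [j], PySem.Set.add st2.2 j)) ([], st.2.1)
      (if inner.1.isEmpty then st.1 else st.1 ++ [inner.1], inner.2, done)) ([], PySem.Set.empty, PySem.Set.empty)).1

-- ===== PRECONDITION & SPEC =====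
def Spec_get_final_list (nestedlist : List (List String)) (ordered_trs : List String) (out : List (List (List String))) : Prop := out = get_final_list_alt nestedlist ordered_trs
instance (nestedlist : List (List String)) (ordered_trs : List String) (out : List (List (List String))) : Decidable (Spec_get_final_list nestedlist ordered_trs out) := by unfold Spec_get_final_list; infer_instance

-- ===== CLAIM (what is proved, stated in full; the proofs are below) =====
def Claim_equal_get_final_list : Prop := ∀ (nestedlist : List (List String)) (ordered_trs : List String), Dom_get_final_list nestedlist ordered_trs → Spec_get_final_list nestedlist ordered_trs (get_final_list nestedlist ordered_trs)

-- ===== LEMMAS AND PROOFS =====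

-- filtering a Nodup list for (== i) yields [i] iff i is present
theorem pv_filter_beq_of_nodup (l : List String) (i : String) (h : l.Nodup) :
    l.filter (· == i) = if i ∈ l then [i] else [] := by
  induction l with
  | nil => simp
  | cons a t ih =>
    rw [List.nodup_cons] at h
    obtain ⟨ha, ht⟩ := h
    by_cases hai : a = i
    · subst hai
      have : t.filter (· == a) = [] := by
        rw [ih ht]; simp [ha]
      simp [this]
    · simp [hai, ih ht, Ne.symm hai]

theorem pv_flatMap_if_singleton (l : List (List String)) (p : List String → Prop) [DecidablePred p] :
    l.flatMap (fun x => if p x then [x] else []) = l.filter (fun x => decide (p x)) := by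
  induction l with
  | nil => rfl
  | cons a t ih => by_cases h : p a <;> simp [List.flatMap_cons, h, ih]

-- the nested index-building loop is one loop over the (element, sublist) pairs
theorem pvIndex_eq_pairs (nl : List (List String)) (d : PySem.Dict String (List (List String))) :
    nl.foldl (fun d j => (PySem.List.dedup j).foldl (fun d e => d.modify e [] (· ++ [j])) d) d
      = (nl.flatMap (fun j => (PySem.List.dedup j).map (fun e => (e, j)))).foldl
          (fun d p => d.modify p.1 [] (· ++ [p.2])) d := by
  induction nl generalizing d with
  | nil => rfl
  | cons j t ih =>
    simp only [List.foldl_cons, List.flatMap_cons, List.foldl_append, List.foldl_map]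
    exact ih _

-- the inverted index looked up at i is exactly A's inner scan of nestedlist for i
theorem pvIndex_getD (nl : List (List String)) (i : String) :
    (pvIndex nl).getD i [] = nl.filter (fun j => decide (i ∈ j)) := by
  unfold pvIndex
  rw [pvIndex_eq_pairs, PySem.Dict.getD_foldl_modify_append]
  rw [List.filter_flatMap, List.map_flatMap]
  have : ∀ j : List String,
      ((((PySem.List.dedup j).map (fun e => (e, j))).filter (fun p => p.1 == i)).map (·.2))
        = if i ∈ j then [j] else [] := by
    intro j
    rw [List.filter_map]
    have : ((PySem.List.dedup j).filter ((fun p => p.1 == i) ∘ (fun e => (e, j))))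
        = if i ∈ j then [i] else [] := by
      have := pv_filter_beq_of_nodup (PySem.List.dedup j) i (PySem.List.nodup_dedup j)
      simpa [PySem.List.mem_dedup, Function.comp] using this
    rw [this]
    by_cases h : i ∈ j <;> simp [h]
  calc (nl.flatMap fun j => (((PySem.List.dedup j).map (fun e => (e, j))).filter (fun p => p.1 == i)).map (·.2))
      = nl.flatMap (fun j => if i ∈ j then [j] else []) := by
        exact List.flatMap_congr (fun j _ => this j)
    _ = nl.filter (fun j => decide (i ∈ j)) := pv_flatMap_if_singleton nl _

-- the two dedup steps agree
theorem pv_step_eq (st2 : List (List String) × List (List String)) (j : List String) :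
    (if j ∈ st2.2 then st2 else (st2.1 ++ [j], st2.2 ++ [j]))
      = (if j ∈ st2.2 then st2 else (st2.1 ++ [j], PySem.Set.add st2.2 j)) := by
  by_cases h : j ∈ st2.2
  · simp [h]
  · simp [h, PySem.Set.add, List.contains_eq_mem]

theorem pv_emit (a : List (List (List String))) (r : List (List String) × PySem.Set (List String)) :
    ((if r.1.length > 0 then a ++ [r.1] else a, r.2) : List (List (List String)) × PySem.Set (List String))
      = (if r.1.isEmpty then a else a ++ [r.1], r.2) := by
  obtain ⟨r1, r2⟩ := r
  cases r1 <;> simp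

-- the dedup fold is the identity when everything is already seen
theorem pv_fold_id (l : List (List String)) (out : List (List String)) (p : PySem.Set (List String))
    (h : ∀ j ∈ l, j ∈ p) :
    l.foldl (fun (st2 : List (List String) × PySem.Set (List String)) j =>
      if j ∈ st2.2 then st2 else (st2.1 ++ [j], PySem.Set.add st2.2 j)) (out, p) = (out, p) := by
  induction l with
  | nil => rfl
  | cons a t ih =>
    simp only [List.foldl_cons, h a List.mem_cons_self, if_pos]
    exact ih (fun j hj => h j (List.mem_cons_of_mem a hj))

-- after the dedup fold, the seen component contains everything it contained before plus all fed elements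
theorem pv_fold_seen (l : List (List String)) (out : List (List String)) (p : PySem.Set (List String)) :
    (∀ x ∈ p, x ∈ (l.foldl (fun (st2 : List (List String) × PySem.Set (List String)) j =>
        if j ∈ st2.2 then st2 else (st2.1 ++ [j], PySem.Set.add st2.2 j)) (out, p)).2) ∧
    (∀ j ∈ l, j ∈ (l.foldl (fun (st2 : List (List String) × PySem.Set (List String)) j =>
        if j ∈ st2.2 then st2 else (st2.1 ++ [j], PySem.Set.add st2.2 j)) (out, p)).2) := by
  induction l generalizing out p with
  | nil => exact ⟨fun x hx => hx, fun j hj => absurd hj (List.not_mem_nil)⟩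
  | cons a t ih =>
    simp only [List.foldl_cons]
    by_cases ha : a ∈ p
    · rw [if_pos ha]
      refine ⟨(ih out p).1, fun j hj => ?_⟩
      rcases List.mem_cons.mp hj with rfl | hj
      · exact (ih out p).1 j ha
      · exact (ih out p).2 j hj
    · rw [if_neg ha]
      have hmem : ∀ x, x ∈ p ∨ x = a → x ∈ PySem.Set.add p a := by
        intro x hx
        simp [PySem.Set.add, ha]
        tauto
      refine ⟨fun x hx => (ih _ _).1 x (hmem x (Or.inl hx)), fun j hj => ?_⟩
      rcases List.mem_cons.mp hj with rfl | hj
      · exact (ih _ _).1 j (hmem j (Or.inr rfl))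
      · exact (ih _ _).2 j hj

-- A's outer loop and B's outer loop stay in lockstep under the done-invariant
theorem pv_main (nl : List (List String)) (ots : List String)
    (fl : List (List (List String))) (p : List (List String)) (done : PySem.Set String)
    (hinv : ∀ k ∈ done, ∀ j ∈ nl, k ∈ j → j ∈ p) :
    (ots.foldl (fun (st : List (List (List String)) × List (List String)) i =>
      let inner := nl.foldl
        (fun (st2 : List (List String) × List (List String)) j =>
          if i ∈ j then
            (if j ∈ st2.2 then st2 else (st2.1 ++ [j], st2.2 ++ [j]))
          else st2) ([], st.2)
      (if inner.1.length > 0 then st.1 ++ [inner.1] else st.1, inner.2)) (fl, p)).1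
    = (ots.foldl (fun (st : List (List (List String)) × PySem.Set (List String) × PySem.Set String) i =>
        if i ∈ st.2.2 then st
        else
          let done := PySem.Set.add st.2.2 i
          let inner := ((pvIndex nl).getD i []).foldl
            (fun (st2 : List (List String) × PySem.Set (List String)) j =>
              if j ∈ st2.2 then st2 else (st2.1 ++ [j], PySem.Set.add st2.2 j)) ([], st.2.1)
          (if inner.1.isEmpty then st.1 else st.1 ++ [inner.1], inner.2, done)) (fl, p, done)).1 := by
  induction ots generalizing fl p done with
  | nil => rfl
  | cons i t ih =>
    simp only [List.foldl_cons]
    have hAinner : nl.foldl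
        (fun (st2 : List (List String) × List (List String)) j =>
          if i ∈ j then (if j ∈ st2.2 then st2 else (st2.1 ++ [j], st2.2 ++ [j])) else st2) ([], p)
        = ((pvIndex nl).getD i []).foldl
            (fun (st2 : List (List String) × PySem.Set (List String)) j =>
              if j ∈ st2.2 then st2 else (st2.1 ++ [j], PySem.Set.add st2.2 j)) ([], p) := by
      rw [pvIndex_getD,
          PySem.List.foldl_ite_eq_foldl_filter (p := fun j => i ∈ j)
            (f := fun st2 j => if j ∈ st2.2 then st2 else (st2.1 ++ [j], st2.2 ++ [j]))]
      exact List.foldl_ext _ _ _ (fun st2 j _ => pv_step_eq st2 j)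
    by_cases hdone : i ∈ done
    · -- repeated key: A's scan finds nothing new, B skips
      rw [if_pos hdone]
      have hall : ∀ j ∈ (pvIndex nl).getD i [], j ∈ p := by
        rw [pvIndex_getD]
        intro j hj
        rw [List.mem_filter] at hj
        exact hinv i hdone j hj.1 (of_decide_eq_true hj.2)
      rw [hAinner, pv_fold_id _ [] p hall]
      simpa using ih fl p done hinv
    · rw [if_neg hdone, hAinner]
      rw [pv_emit fl _]
      apply ih
      intro k hk j hj hkj
      by_cases hki : k = i
      · subst hki
        refine (pv_fold_seen ((pvIndex nl).getD k []) [] p).2 j ?_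
        rw [pvIndex_getD]
        exact List.mem_filter.mpr ⟨hj, decide_eq_true hkj⟩
      · have hkd : k ∈ done := by
          simp [PySem.Set.add, hdone] at hk
          rcases hk with h | h
          · exact h
          · exact absurd h hki
        exact (pv_fold_seen ((pvIndex nl).getD i []) [] p).1 j (hinv k hkd j hj hkj)

-- ===== VERDICT (by name: the statement is the Claim_ definition above) =====
theorem get_final_list_spec : Claim_equal_get_final_list := by
  intro nl ots _
  unfold Spec_get_final_list get_final_list get_final_list_alt
  exact pv_main nl ots [] [] PySem.Set.empty (fun k hk => absurd hk (List.not_mem_nil))
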